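-- pv_equiv track=rewrite | github.com/miliar/Code_Jam_Webscraper | solutions_python/Problem_201/652.py | get_ls
-- ===== SOURCE A (Python) =====
-- import typing
--
-- def get_ls(occupied) -> typing.List[int]:
--     ls = [0] * len(occupied)
--     for i in range(1, len(occupied)):
--         if occupied[i - 1]:
--             ls[i] = 0
--         else:
--             ls[i] = ls[i - 1] + 1
--     return ls
-- ===== SOURCE B (Python) =====
-- import typing
--
-- def get_ls(occupied) -> typing.List[int]:
--     # Run-based: group occupied[:-1] into maximal runs; a run of m occupied
--     # seats contributes m zeros, a run of m free seats contributes 1..m.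
--     if not occupied:
--         return []
--     segments = []
--     cur = None  # (value, length) of the current maximal run
--     for x in occupied[:-1]:
--         x = bool(x)
--         if cur is None:
--             cur = (x, 1)
--         elif cur[0] == x:
--             cur = (cur[0], cur[1] + 1)
--         else:
--             segments.append(cur)
--             cur = (x, 1)
--     if cur is not None:
--         segments.append(cur)
--     res = [0]
--     for b, m in segments:
--         res.extend([0] * m if b else range(1, m + 1))
--     return res
-- ===== Notes on version B (the rewrite author's own statement) =====
-- stated objective: alternative
-- what changed: Instead of A's per-index loop that increments or resets a counter cell by cell, B run-length-encodes occupied[:-1] into maximal runs and emits each run's whole segment at once (m zeros for an occupied run, 1..m for a free run), prepending the fixed leading 0.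
import Mathlib
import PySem

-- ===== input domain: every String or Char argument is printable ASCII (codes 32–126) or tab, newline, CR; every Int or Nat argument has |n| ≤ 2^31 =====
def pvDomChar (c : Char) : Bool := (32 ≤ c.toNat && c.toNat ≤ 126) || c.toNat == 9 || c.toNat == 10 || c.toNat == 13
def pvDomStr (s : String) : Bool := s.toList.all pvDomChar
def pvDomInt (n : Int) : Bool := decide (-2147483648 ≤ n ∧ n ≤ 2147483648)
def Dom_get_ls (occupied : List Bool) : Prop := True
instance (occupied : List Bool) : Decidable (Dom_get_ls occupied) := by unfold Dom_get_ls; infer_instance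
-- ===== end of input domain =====

-- B replaces A's per-index increment/reset loop by decomposing occupied[:-1] into maximal
-- runs and emitting each run's whole segment at once (alternative decomposition, same cost).


-- ===== PORT A =====
-- ls = [0] * len(occupied); for i in range(1, len(occupied)): ls[i] = 0 if occupied[i-1] else ls[i-1]+1
def get_ls (occupied : List Bool) : List Int :=
  (PySem.List.pyRange 1 (occupied.length : Int) 1).foldl
    (fun ls i =>
      if PySem.List.pyGetD occupied (i - 1) false then
        PySem.List.pySetD ls i 0
      else
        PySem.List.pySetD ls i (PySem.List.pyGetD ls (i - 1) 0 + 1))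
    (List.replicate occupied.length (0 : Int))

-- ===== PORT B =====
-- one step of the run-collecting loop: state = (finished runs, current run)
def pvStepB (st : List (Bool × Nat) × Option (Bool × Nat)) (x : Bool) :
    List (Bool × Nat) × Option (Bool × Nat) :=
  match st.2 with
  | none => (st.1, some (x, 1))
  | some (b, n) => if b = x then (st.1, some (b, n + 1)) else (st.1 ++ [(b, n)], some (x, 1))

-- segment contributed by one run: m zeros for occupied, 1..m for free
def pvSeg (b : Bool) (m : Nat) : List Int :=
  if b then List.replicate m (0 : Int) else (List.range m).map (fun k => (k : Int) + 1)

def get_ls_alt (occupied : List Bool) : List Int :=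
  match occupied with
  | [] => []
  | _ :: _ =>
    let st := occupied.dropLast.foldl pvStepB ([], none)
    let segments := match st.2 with | none => st.1 | some r => st.1 ++ [r]
    0 :: segments.flatMap (fun r => pvSeg r.1 r.2)

-- ===== PRECONDITION & SPEC =====
def Spec_get_ls (occupied : List Bool) (out : List Int) : Prop := out = get_ls_alt occupied
instance (occupied : List Bool) (out : List Int) : Decidable (Spec_get_ls occupied out) := by unfold Spec_get_ls; infer_instance

-- ===== CLAIM (what is proved, stated in full; the proofs are below) =====
def Claim_equal_get_ls : Prop := ∀ (occupied : List Bool), Dom_get_ls occupied → Spec_get_ls occupied (get_ls occupied)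

-- ===== LEMMAS AND PROOFS =====

-- reference recurrence: scanA c l emits c, then recurses with the updated counter
def pvScanA (c : Int) : List Bool → List Int
  | [] => []
  | x :: xs => c :: pvScanA (if x then 0 else c + 1) xs

-- emit-after variant: value produced AFTER reading each element
def pvTval (c : Int) : List Bool → List Int
  | [] => []
  | x :: xs => (if x then 0 else c + 1) :: pvTval (if x then 0 else c + 1) xs

def pvCarry (c : Int) (l : List Bool) : Int :=
  l.foldl (fun c x => if x then 0 else c + 1) c

-- recursive run-length grouping (b, n) = current run
def pvRunsAux (b : Bool) (n : Nat) : List Bool → List (Bool × Nat)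
  | [] => [(b, n)]
  | y :: ys => if y = b then pvRunsAux b (n + 1) ys else (b, n) :: pvRunsAux y 1 ys

theorem pvScanA_length (c : Int) (l : List Bool) : (pvScanA c l).length = l.length := by
  induction l generalizing c with
  | nil => rfl
  | cons x xs ih => simp [pvScanA, ih]

theorem pvScanA_snoc (c : Int) (l : List Bool) (x : Bool) :
    pvScanA c (l ++ [x]) = pvScanA c l ++ [pvCarry c l] := by
  induction l generalizing c with
  | nil => rfl
  | cons y ys ih => simp [pvScanA, pvCarry, ih, List.foldl_cons]

theorem pvCarry_snoc (c : Int) (l : List Bool) (x : Bool) :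
    pvCarry c (l ++ [x]) = if x then 0 else pvCarry c l + 1 := by
  simp [pvCarry]

theorem pvScanA_cons_tval (c : Int) (l : List Bool) (h : l ≠ []) :
    pvScanA c l = c :: pvTval c l.dropLast := by
  induction l generalizing c with
  | nil => exact absurd rfl h
  | cons x xs ih =>
    cases xs with
    | nil => rfl
    | cons y ys =>
      rw [show pvScanA c (x :: y :: ys) = c :: pvScanA (if x then 0 else c + 1) (y :: ys) from rfl,
        ih _ (by simp)]
      rfl

theorem pvSeg_snoc (b : Bool) (n : Nat) :
    pvSeg b (n + 1) = pvSeg b n ++ [if b then (0 : Int) else (n : Int) + 1] := by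
  cases b <;> simp [pvSeg, List.replicate_succ', List.range_succ]

theorem pvRunsAux_flatMap (l : List Bool) (b : Bool) (n : Nat) :
    (pvRunsAux b n l).flatMap (fun r => pvSeg r.1 r.2) =
      pvSeg b n ++ pvTval (if b then 0 else (n : Int)) l := by
  induction l generalizing b n with
  | nil => simp [pvRunsAux, pvTval]
  | cons x xs ih =>
    by_cases hx : x = b
    · subst hx
      rw [show pvRunsAux x n (x :: xs) = pvRunsAux x (n + 1) xs from by simp [pvRunsAux],
        ih, pvSeg_snoc]
      cases x <;> simp [pvTval]
    · have hx' : b ≠ x := fun h => hx h.symm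
      rw [show pvRunsAux b n (x :: xs) = (b, n) :: pvRunsAux x 1 xs from by simp [pvRunsAux, hx],
        List.flatMap_cons, ih]
      cases x <;> cases b <;> simp_all [pvSeg, pvTval]

theorem pvFoldlB (l : List Bool) (acc : List (Bool × Nat)) (b : Bool) (n : Nat) :
    (match (l.foldl pvStepB (acc, some (b, n))).2 with
      | none => (l.foldl pvStepB (acc, some (b, n))).1
      | some r => (l.foldl pvStepB (acc, some (b, n))).1 ++ [r]) =
      acc ++ pvRunsAux b n l := by
  induction l generalizing acc b n with
  | nil => simp [pvRunsAux]
  | cons x xs ih =>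
    rw [List.foldl_cons]
    by_cases hx : b = x
    · subst hx
      rw [show pvStepB (acc, some (b, n)) b = (acc, some (b, n + 1)) from by simp [pvStepB], ih,
        show pvRunsAux b n (b :: xs) = pvRunsAux b (n + 1) xs from by simp [pvRunsAux]]
    · have hx' : x ≠ b := fun h => hx h.symm
      rw [show pvStepB (acc, some (b, n)) x = (acc ++ [(b, n)], some (x, 1)) from by
          simp [pvStepB, hx], ih,
        show pvRunsAux b n (x :: xs) = (b, n) :: pvRunsAux x 1 xs from by simp [pvRunsAux, hx']]
      simp

-- B equals the reference recurrence
theorem get_ls_alt_eq_scan (occupied : List Bool) :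
    get_ls_alt occupied = pvScanA 0 occupied := by
  cases occupied with
  | nil => rfl
  | cons y ys =>
    rw [pvScanA_cons_tval 0 (y :: ys) (by simp)]
    show (0 : Int) :: _ = _
    congr 1
    cases h : (y :: ys).dropLast with
    | nil => simp [pvTval]
    | cons p ps =>
      simp only [List.foldl_cons,
        show pvStepB ([], none) p = ([], some (p, 1)) from rfl]
      rw [pvFoldlB]
      simp only [List.nil_append, pvRunsAux_flatMap, pvTval]
      cases p <;> simp [pvSeg]

-- the A-side loop invariant
theorem get_ls_inv (occupied : List Bool) (k : Nat) (hk : k ≤ occupied.length) :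
    (PySem.List.pyRange 1 (k : Int) 1).foldl
      (fun ls i =>
        if PySem.List.pyGetD occupied (i - 1) false then
          PySem.List.pySetD ls i 0
        else
          PySem.List.pySetD ls i (PySem.List.pyGetD ls (i - 1) 0 + 1))
      (List.replicate occupied.length (0 : Int)) =
      pvScanA 0 (occupied.take k) ++ List.replicate (occupied.length - k) (0 : Int) := by
  induction k with
  | zero =>
    rw [show ((0 : Nat) : Int) = 0 by norm_num, PySem.List.pyRange_one_eq_nil (by norm_num)]
    simp [pvScanA]
  | succ k ih =>
    have hk' : k ≤ occupied.length := Nat.le_of_succ_le hk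
    cases k with
    | zero =>
      rw [show ((1 : Nat) : Int) = 1 by norm_num, PySem.List.pyRange_one_eq_nil (le_refl 1)]
      cases occupied with
      | nil => exact absurd hk (by simp)
      | cons a as => simp [pvScanA, List.replicate_succ]
    | succ j =>
      -- loop range 1..j+1 splits as 1..j+1 ++ [j+1]
      have hsplit : PySem.List.pyRange 1 ((j + 2 : Nat) : Int) 1 =
          PySem.List.pyRange 1 ((j + 1 : Nat) : Int) 1 ++ [((j + 1 : Nat) : Int)] := by
        have h2 : ((j + 2 : Nat) : Int) = ((j + 1 : Nat) : Int) + 1 := by push_cast; ring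
        rw [h2]
        exact PySem.List.pyRange_one_succ_right (by exact_mod_cast Nat.succ_le_succ (Nat.zero_le j))
      rw [hsplit, List.foldl_append, ih hk', List.foldl_cons, List.foldl_nil]
      have hj1 : j + 1 < occupied.length := hk
      -- the element read: occupied[j]
      have hidx : ((j + 1 : Nat) : Int) - 1 = ((j : Nat) : Int) := by push_cast; ring
      rw [hidx, PySem.List.pyGetD_natCast, PySem.List.pyGetD_natCast, PySem.List.pySetD_natCast,
        PySem.List.pySetD_natCast]
      have hjlt : j < occupied.length := Nat.lt_of_succ_lt hj1
      have hocc : occupied.getD j false = occupied[j] := List.getD_eq_getElem occupied false hjlt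
      -- take (j+1) = take j ++ [occupied[j]]
      have htake : occupied.take (j + 1) = occupied.take j ++ [occupied[j]] := by
        rw [List.take_add_one]; simp [List.getElem?_eq_getElem hjlt]
      have htake2 : occupied.take (j + 2) = occupied.take (j + 1) ++ [occupied[j + 1]'hj1] := by
        rw [List.take_add_one]; simp [List.getElem?_eq_getElem hj1]
      have hlen : (pvScanA 0 (occupied.take (j + 1))).length = j + 1 := by
        rw [pvScanA_length, List.length_take]; omega
      -- the accumulator value read: acc[j] = pvCarry 0 (take j)
      have hread : (pvScanA 0 (occupied.take (j + 1)) ++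
          List.replicate (occupied.length - (j + 1)) (0 : Int)).getD j 0 =
          pvCarry 0 (occupied.take j) := by
        rw [htake, pvScanA_snoc]
        have hlj : (pvScanA 0 (occupied.take j)).length = j := by
          rw [pvScanA_length, List.length_take]; omega
        rw [List.append_assoc, List.getD_eq_getElem?_getD, List.getElem?_append_right (by omega),
          hlj, Nat.sub_self]
        simp
      -- the write at index j+1 lands at the head of the replicate tail
      have hset : ∀ v : Int,
          (pvScanA 0 (occupied.take (j + 1)) ++
            List.replicate (occupied.length - (j + 1)) (0 : Int)).set (j + 1) v =
          pvScanA 0 (occupied.take (j + 1)) ++ v :: List.replicate (occupied.length - (j + 2)) (0 : Int) := by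
        intro v
        rw [List.set_append_right _ _ (by omega), hlen, Nat.sub_self]
        congr 1
        have : occupied.length - (j + 1) = (occupied.length - (j + 2)) + 1 := by omega
        rw [this, List.replicate_succ, List.set_cons_zero]
      have hscan2 : pvScanA 0 (occupied.take (j + 2)) =
          pvScanA 0 (occupied.take (j + 1)) ++ [pvCarry 0 (occupied.take (j + 1))] := by
        rw [htake2, pvScanA_snoc]
      have hcarry : pvCarry 0 (occupied.take (j + 1)) =
          if occupied[j] then 0 else pvCarry 0 (occupied.take j) + 1 := by
        rw [htake, pvCarry_snoc]
      by_cases hb : occupied[j]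
      · rw [if_pos (by rw [hocc]; exact hb), hset, hscan2, hcarry, if_pos hb]
        simp
      · rw [if_neg (by rw [hocc]; exact hb), hread, hset, hscan2, hcarry, if_neg hb]
        simp

theorem get_ls_eq_scan (occupied : List Bool) : get_ls occupied = pvScanA 0 occupied := by
  have := get_ls_inv occupied occupied.length (le_refl _)
  simpa [get_ls] using this

-- ===== VERDICT (by name: the statement is the Claim_ definition above) =====
theorem get_ls_spec : Claim_equal_get_ls := by
  intro occupied _
  show get_ls occupied = get_ls_alt occupied
  rw [get_ls_eq_scan, get_ls_alt_eq_scan]
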